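-- pv_equiv track=rewrite | github.com/maduMelo/Blocks-World-A-Star | format.py | define_levels
-- ===== SOURCE A (Python) =====
-- def define_levels(state):
--     level_1, level_2, level_3, level_4 = [], [], [], []
--     for block in state:
--         if block != "M":
--             if state[block][1] == "M":
--                 level_1.append(block)
--
--                 if state[block][0]:
--                     level_2.append(state[block][0])
--
--                     if state[state[block][0]][0]:
--                         level_3.append(state[state[block][0]][0])
--
--                         if state[state[state[block][0]][0]][0]:
--                             level_4.append(state[state[state[block][0]][0]][0])
--                         else:
--                           level_4.append(" ")
--                     else:
--                         level_3.append(" ")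
--                 else:
--                     level_2.append(" ")
--     return level_1, level_2, level_3, level_4
-- ===== SOURCE B (Python) =====
-- def define_levels(state):
--     def chain(root):
--         row = [root]
--         while len(row) < 4:
--             nxt = state[row[-1]][0]
--             if not nxt:
--                 row.append(" ")
--                 break
--             row.append(nxt)
--         return row
--
--     rows = [chain(b) for b in state if b != "M" and state[b][1] == "M"]
--     return tuple([r[i] for r in rows if len(r) > i] for i in range(4))
-- ===== Notes on version B (the rewrite author's own statement) =====
-- stated objective: alternative
-- what changed: B first builds, for each table-level root, its padded stack chain as a row (one while loop per root), and then returns the four levels as the columns of these rows (a transpose via comprehensions), instead of A's interleaved appends inside a 4-deep conditional nest.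
import Mathlib
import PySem

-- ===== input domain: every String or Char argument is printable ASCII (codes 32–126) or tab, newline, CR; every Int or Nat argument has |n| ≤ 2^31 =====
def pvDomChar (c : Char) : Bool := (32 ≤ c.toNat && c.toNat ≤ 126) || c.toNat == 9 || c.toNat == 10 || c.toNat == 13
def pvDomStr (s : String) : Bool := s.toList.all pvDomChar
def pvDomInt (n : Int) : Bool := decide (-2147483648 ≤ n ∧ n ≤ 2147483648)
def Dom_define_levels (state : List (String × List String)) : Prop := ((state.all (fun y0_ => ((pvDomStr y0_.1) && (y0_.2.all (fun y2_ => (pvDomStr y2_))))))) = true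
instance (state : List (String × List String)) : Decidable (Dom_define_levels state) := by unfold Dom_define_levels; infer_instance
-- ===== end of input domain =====

-- B builds, per table-level root, its padded stack chain (a row), then returns the four levels
-- as the columns of these rows (a transpose), instead of A's interleaved appends inside a
-- 4-deep conditional nest (objective: alternative).


-- shared dict-lookup helper: state[k] (first match; Pre_ guarantees the key is present where accessed)
def pvGet (state : List (String × List String)) (k : String) : List String :=
  (PySem.Dict.get? (PySem.Dict.mk state) k).getD []

-- ===== PORT A =====
-- literal transliteration of A: fold over the dict's keys, the same 4-deep nest of ifs
def define_levels (state : List (String × List String)) : List String × List String × List String × List String :=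
  state.foldl (fun acc p =>
    let (l1, l2, l3, l4) := acc
    let block := p.1
    if block ≠ "M" then
      if PySem.List.pyGetD (pvGet state block) 1 "" = "M" then
        let l1 := l1 ++ [block]
        let b1 := PySem.List.pyGetD (pvGet state block) 0 ""
        if b1 ≠ "" then
          let l2 := l2 ++ [b1]
          let b2 := PySem.List.pyGetD (pvGet state b1) 0 ""
          if b2 ≠ "" then
            let l3 := l3 ++ [b2]
            let b3 := PySem.List.pyGetD (pvGet state b2) 0 ""
            if b3 ≠ "" then (l1, l2, l3, l4 ++ [b3])
            else (l1, l2, l3, l4 ++ [" "])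
          else (l1, l2, l3 ++ [" "], l4)
        else (l1, l2 ++ [" "], l3, l4)
      else (l1, l2, l3, l4)
    else (l1, l2, l3, l4)) ([], [], [], [])

-- ===== PORT B =====
-- the 'while len(row) < 4' loop of chain(): n = remaining capacity, cur = row[-1]
def pvRowAux (state : List (String × List String)) : Nat → String → List String
  | 0, _ => []
  | n + 1, cur =>
    let nxt := PySem.List.pyGetD (pvGet state cur) 0 ""
    if nxt ≠ "" then nxt :: pvRowAux state n nxt
    else [" "]   -- break: row ends with the pad

-- chain(root): the (padded) stack chain starting at a table-level root, length ≤ 4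
def pvRow (state : List (String × List String)) (root : String) : List String :=
  root :: pvRowAux state 3 root

def define_levels_alt (state : List (String × List String)) : List String × List String × List String × List String :=
  let rows := (state.filter (fun p =>
      p.1 != "M" && (PySem.List.pyGetD (pvGet state p.1) 1 "" == "M"))).map
    (fun p => pvRow state p.1)
  (rows.filterMap (fun r => r[0]?), rows.filterMap (fun r => r[1]?),
   rows.filterMap (fun r => r[2]?), rows.filterMap (fun r => r[3]?))

-- ===== PRECONDITION & SPEC =====
-- Pre_ excludes (a) inputs where Python A raises: a key ≠ "M" whose value has fewer than 2
-- entries (IndexError), or a walked chain step whose block is missing (KeyError) or has an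
-- empty value list (IndexError); and (b) assoc lists with duplicate keys, which a Python dict
-- collapses before A ever sees them, so such a list does not represent what A receives.
def Pre_define_levels (state : List (String × List String)) : Prop :=
  (state.map Prod.fst).Nodup ∧
  ∀ p ∈ state, p.1 ≠ "M" →
    2 ≤ p.2.length ∧
    (p.2.getD 1 "" = "M" →
      p.2.headD "" ≠ "" →
        p.2.headD "" ∈ state.map Prod.fst ∧
        1 ≤ (pvGet state (p.2.headD "")).length ∧
        ((pvGet state (p.2.headD "")).headD "" ≠ "" →
          (pvGet state (p.2.headD "")).headD "" ∈ state.map Prod.fst ∧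
          1 ≤ (pvGet state ((pvGet state (p.2.headD "")).headD "")).length))
instance (state : List (String × List String)) : Decidable (Pre_define_levels state) := by unfold Pre_define_levels; infer_instance

def pvWitness_define_levels : (List (String × List String)) :=
  [("A", ["B", "M"]), ("B", ["", "A"])]

def Spec_define_levels (state : List (String × List String)) (out : List String × List String × List String × List String) : Prop := out = define_levels_alt state
instance (state : List (String × List String)) (out : List String × List String × List String × List String) : Decidable (Spec_define_levels state out) := by unfold Spec_define_levels; infer_instance

-- ===== CLAIM (what is proved, stated in full; the proofs are below) =====
def Claim_equal_define_levels : Prop := ∀ (state : List (String × List String)), Dom_define_levels state → Pre_define_levels state → Spec_define_levels state (define_levels state)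

-- ===== LEMMAS AND PROOFS =====

-- A's per-block step (the same lambda the port A folds with), named for the proofs
def pvAStep (state : List (String × List String))
    (acc : List String × List String × List String × List String) (p : String × List String) :
    List String × List String × List String × List String :=
  let (l1, l2, l3, l4) := acc
  let block := p.1
  if block ≠ "M" then
    if PySem.List.pyGetD (pvGet state block) 1 "" = "M" then
      let l1 := l1 ++ [block]
      let b1 := PySem.List.pyGetD (pvGet state block) 0 ""
      if b1 ≠ "" then
        let l2 := l2 ++ [b1]
        let b2 := PySem.List.pyGetD (pvGet state b1) 0 ""
        if b2 ≠ "" then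
          let l3 := l3 ++ [b2]
          let b3 := PySem.List.pyGetD (pvGet state b2) 0 ""
          if b3 ≠ "" then (l1, l2, l3, l4 ++ [b3])
          else (l1, l2, l3, l4 ++ [" "])
        else (l1, l2, l3 ++ [" "], l4)
      else (l1, l2 ++ [" "], l3, l4)
    else (l1, l2, l3, l4)
  else (l1, l2, l3, l4)

-- B's filter predicate, named
def pvQ (state : List (String × List String)) (p : String × List String) : Bool :=
  p.1 != "M" && (PySem.List.pyGetD (pvGet state p.1) 1 "" == "M")

-- the i-th level contributed by the tail 'rest' of the outer iteration
def pvCol (state : List (String × List String)) (rest : List (String × List String)) (i : Nat) :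
    List String :=
  ((rest.filter (pvQ state)).map (fun p => pvRow state p.1)).filterMap (fun r => r[i]?)

-- one qualifying block contributes to level i exactly its row's i-th entry (if any)
theorem pv_step_eq (state : List (String × List String)) (p : String × List String)
    (acc : List String × List String × List String × List String) :
    pvAStep state acc p =
      (acc.1 ++ (if pvQ state p then (pvRow state p.1)[0]?.toList else []),
       acc.2.1 ++ (if pvQ state p then (pvRow state p.1)[1]?.toList else []),
       acc.2.2.1 ++ (if pvQ state p then (pvRow state p.1)[2]?.toList else []),
       acc.2.2.2 ++ (if pvQ state p then (pvRow state p.1)[3]?.toList else [])) := by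
  obtain ⟨l1, l2, l3, l4⟩ := acc
  simp only [pvAStep, pvQ, pvRow, pvRowAux]
  split_ifs <;> simp_all

theorem pv_fold_eq (state : List (String × List String)) (rest : List (String × List String))
    (acc : List String × List String × List String × List String) :
    rest.foldl (pvAStep state) acc =
      (acc.1 ++ pvCol state rest 0, acc.2.1 ++ pvCol state rest 1,
       acc.2.2.1 ++ pvCol state rest 2, acc.2.2.2 ++ pvCol state rest 3) := by
  induction rest generalizing acc with
  | nil => simp [pvCol]
  | cons p rest ih =>
    simp only [List.foldl_cons, ih, pv_step_eq]
    by_cases h : pvQ state p <;>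
      simp [pvCol, h, List.filterMap_cons, Option.toList] <;>
      cases (pvRow state p.1)[0]? <;> cases (pvRow state p.1)[1]? <;>
      cases (pvRow state p.1)[2]? <;> cases (pvRow state p.1)[3]? <;> simp_all

-- ===== VERDICT (by name: the statement is the Claim_ definition above) =====
theorem define_levels_spec : Claim_equal_define_levels := by
  intro state _ _
  show define_levels state = define_levels_alt state
  have hA : define_levels state = state.foldl (pvAStep state) ([], [], [], []) := rfl
  rw [hA, pv_fold_eq]
  have hq : (fun p => p.1 != "M" && (PySem.List.pyGetD (pvGet state p.1) 1 "" == "M")) = pvQ state := rfl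
  simp [define_levels_alt, pvCol, hq]
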